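-- pv_equiv track=rewrite | github.com/iAmSomething/2026- | scripts/run_issue328_national_summary_freshness_v2_remote.py | _source_rank
-- ===== SOURCE A (Python) =====
-- from typing import Any
--
-- def _source_rank(source_channel: Any, source_channels: Any) -> int:
--     channels = {str(source_channel or "").strip().lower()} if source_channel else set()
--     for ch in source_channels or []:
--         norm = str(ch or "").strip().lower()
--         if norm:
--             channels.add(norm)
--     if "nesdc" in channels:
--         return 2
--     if "article" in channels:
--         return 1
--     return 0
-- ===== SOURCE B (Python) =====
-- def _source_rank(source_channel, source_channels):
--     def _score(ch):
--         norm = str(ch or "").strip().lower()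
--         if norm == "nesdc":
--             return 2
--         if norm == "article":
--             return 1
--         return 0
--     candidates = ([source_channel] if source_channel else []) + list(source_channels or [])
--     return max(map(_score, candidates), default=0)
-- ===== Notes on version B (the rewrite author's own statement) =====
-- stated objective: alternative
-- what changed: Instead of collecting normalized channels into a set and testing membership in priority order, B maps every candidate channel to a numeric score (nesdc=2, article=1, other=0) and returns the maximum score.
import Mathlib
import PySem

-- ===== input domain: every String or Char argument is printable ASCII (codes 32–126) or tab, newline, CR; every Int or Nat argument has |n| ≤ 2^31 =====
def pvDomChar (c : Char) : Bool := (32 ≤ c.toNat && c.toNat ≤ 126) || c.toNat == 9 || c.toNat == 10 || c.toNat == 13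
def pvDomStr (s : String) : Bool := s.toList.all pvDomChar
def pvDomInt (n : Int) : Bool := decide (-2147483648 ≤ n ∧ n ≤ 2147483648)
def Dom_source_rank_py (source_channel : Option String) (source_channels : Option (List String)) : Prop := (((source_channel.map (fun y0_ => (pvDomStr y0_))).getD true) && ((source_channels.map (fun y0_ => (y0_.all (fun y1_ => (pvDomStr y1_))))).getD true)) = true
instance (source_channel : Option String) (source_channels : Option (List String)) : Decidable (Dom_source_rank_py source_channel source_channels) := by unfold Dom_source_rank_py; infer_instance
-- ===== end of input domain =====

set_option maxHeartbeats 1000000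

-- B replaces A's set of normalized channels + priority membership tests by a rank-as-max reduction:
-- every candidate channel is mapped to a numeric score (nesdc=2, article=1, other=0) and the maximum is returned.

-- shared normalisation: str(ch or "").strip().lower() (for a String ch, 'ch or ""' is ch itself when nonempty, "" otherwise — same norm either way)
def srNorm (s : String) : String := PySem.Str.lower (PySem.Str.strip s)

-- ===== PORT A =====
def source_rank_py (source_channel : Option String) (source_channels : Option (List String)) : Int :=
  let channels : PySem.Set String :=
    match source_channel with
    | some s => if s ≠ "" then PySem.Set.ofList [srNorm s] else PySem.Set.empty
    | none => PySem.Set.empty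
  let channels := (source_channels.getD []).foldl
    (fun acc ch => let n := srNorm ch; if n ≠ "" then PySem.Set.add acc n else acc) channels
  if PySem.Set.contains channels "nesdc" then 2
  else if PySem.Set.contains channels "article" then 1
  else 0

-- ===== PORT B =====
def srScore (ch : String) : Int :=
  let n := srNorm ch
  if n = "nesdc" then 2
  else if n = "article" then 1
  else 0

def source_rank_py_alt (source_channel : Option String) (source_channels : Option (List String)) : Int :=
  let candidates :=
    (match source_channel with
     | some s => if s ≠ "" then [s] else []
     | none => []) ++ source_channels.getD []
  (candidates.map srScore).foldl max 0   -- max(map(_score, candidates), default=0)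

-- ===== PRECONDITION & SPEC =====
def Spec_source_rank_py (source_channel : Option String) (source_channels : Option (List String)) (out : Int) : Prop := out = source_rank_py_alt source_channel source_channels
instance (source_channel : Option String) (source_channels : Option (List String)) (out : Int) : Decidable (Spec_source_rank_py source_channel source_channels out) := by unfold Spec_source_rank_py; infer_instance

-- ===== CLAIM (what is proved, stated in full; the proofs are below) =====
def Claim_equal_source_rank_py : Prop := ∀ (source_channel : Option String) (source_channels : Option (List String)), Dom_source_rank_py source_channel source_channels → Spec_source_rank_py source_channel source_channels (source_rank_py source_channel source_channels)

-- ===== LEMMAS AND PROOFS =====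

-- A's loop step and A's final ranking of a set
def srStep (acc : PySem.Set String) (ch : String) : PySem.Set String :=
  let n := srNorm ch; if n ≠ "" then PySem.Set.add acc n else acc

def srRank (s : PySem.Set String) : Int :=
  if "nesdc" ∈ s then 2 else if "article" ∈ s then 1 else 0

theorem srRank_eq_contains (s : PySem.Set String) :
    (if PySem.Set.contains s "nesdc" then (2 : Int)
     else if PySem.Set.contains s "article" then 1 else 0) = srRank s := by
  unfold srRank
  by_cases h1 : "nesdc" ∈ s
  · rw [if_pos ((PySem.Set.contains_iff s "nesdc").mpr h1), if_pos h1]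
  · rw [if_neg (fun h => h1 ((PySem.Set.contains_iff s "nesdc").mp h)), if_neg h1]
    by_cases h2 : "article" ∈ s
    · rw [if_pos ((PySem.Set.contains_iff s "article").mpr h2), if_pos h2]
    · rw [if_neg (fun h => h2 ((PySem.Set.contains_iff s "article").mp h)), if_neg h2]

theorem srRank_nonneg (s : PySem.Set String) : 0 ≤ srRank s := by
  unfold srRank; split_ifs <;> norm_num

theorem srRank_le_two (s : PySem.Set String) : srRank s ≤ 2 := by
  unfold srRank; split_ifs <;> norm_num

theorem srScore_nonneg (ch : String) : 0 ≤ srScore ch := by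
  unfold srScore; dsimp only; split_ifs <;> norm_num

-- adding one channel to A's set bumps the rank to the max with that channel's score
theorem srRank_step (acc : PySem.Set String) (ch : String) :
    srRank (srStep acc ch) = max (srRank acc) (srScore ch) := by
  unfold srStep srScore
  dsimp only
  by_cases hemp : srNorm ch = ""
  · rw [if_neg (by simp [hemp]), if_neg (by rw [hemp]; decide), if_neg (by rw [hemp]; decide)]
    have h := srRank_nonneg acc
    omega
  · rw [if_pos hemp]
    by_cases hn : srNorm ch = "nesdc"
    · rw [if_pos hn]
      unfold srRank
      rw [if_pos ((PySem.Set.mem_add _ _ _).mpr (Or.inr hn.symm))]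
      have h := srRank_le_two acc
      omega
    · rw [if_neg hn]
      have hne : "nesdc" ∈ PySem.Set.add acc (srNorm ch) ↔ "nesdc" ∈ acc := by
        rw [PySem.Set.mem_add]
        exact ⟨fun h => h.resolve_right (fun h' => hn h'.symm), Or.inl⟩
      by_cases ha : srNorm ch = "article"
      · rw [if_pos ha]
        unfold srRank
        by_cases hnm : "nesdc" ∈ acc
        · rw [if_pos (hne.mpr hnm), if_pos hnm]; omega
        · rw [if_neg (fun h => hnm (hne.mp h)), if_neg hnm,
              if_pos ((PySem.Set.mem_add _ _ _).mpr (Or.inr ha.symm))]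
          split_ifs <;> omega
      · rw [if_neg ha]
        have hae : "article" ∈ PySem.Set.add acc (srNorm ch) ↔ "article" ∈ acc := by
          rw [PySem.Set.mem_add]
          exact ⟨fun h => h.resolve_right (fun h' => ha h'.symm), Or.inl⟩
        have h := srRank_nonneg acc
        unfold srRank
        by_cases hnm : "nesdc" ∈ acc
        · rw [if_pos (hne.mpr hnm), if_pos hnm]; omega
        · rw [if_neg (fun h => hnm (hne.mp h)), if_neg hnm]
          by_cases ham : "article" ∈ acc
          · rw [if_pos (hae.mpr ham), if_pos ham]; omega
          · rw [if_neg (fun h => ham (hae.mp h)), if_neg ham]; omega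

-- A's folded set ranks exactly as B's running max of scores
theorem srRank_foldl (l : List String) (acc : PySem.Set String) :
    srRank (l.foldl srStep acc) = (l.map srScore).foldl max (srRank acc) := by
  induction l generalizing acc with
  | nil => rfl
  | cons ch rest ih =>
      rw [List.foldl_cons, List.map_cons, List.foldl_cons, ih, srRank_step]

theorem srRank_empty : srRank PySem.Set.empty = 0 := by
  unfold srRank
  rw [if_neg (by simp [PySem.Set.empty]), if_neg (by simp [PySem.Set.empty])]

theorem srRank_single (s : String) : srRank (PySem.Set.ofList [srNorm s]) = srScore s := by
  unfold srRank srScore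
  dsimp only
  by_cases hn : srNorm s = "nesdc"
  · rw [if_pos (by rw [PySem.Set.mem_ofList, hn]; exact List.mem_singleton.mpr rfl), if_pos hn]
  · rw [if_neg (fun h => hn (List.mem_singleton.mp ((PySem.Set.mem_ofList _ _).mp h)).symm), if_neg hn]
    by_cases ha : srNorm s = "article"
    · rw [if_pos (by rw [PySem.Set.mem_ofList, ha]; exact List.mem_singleton.mpr rfl), if_pos ha]
    · rw [if_neg (fun h => ha (List.mem_singleton.mp ((PySem.Set.mem_ofList _ _).mp h)).symm), if_neg ha]

-- ===== VERDICT (by name: the statement is the Claim_ definition above) =====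
theorem source_rank_py_spec : Claim_equal_source_rank_py := by
  intro sc scs _
  show source_rank_py sc scs = source_rank_py_alt sc scs
  unfold source_rank_py source_rank_py_alt
  dsimp only
  rw [srRank_eq_contains]
  set l := scs.getD [] with hl
  have hfold : ∀ init head, srRank init = (head.map srScore).foldl max 0 →
      srRank (l.foldl srStep init) = ((head ++ l).map srScore).foldl max 0 := by
    intro init head hinit
    rw [List.map_append, List.foldl_append, ← hinit, srRank_foldl]
  match sc with
  | none => exact hfold PySem.Set.empty [] srRank_empty
  | some s =>
      dsimp only
      by_cases hs : s = ""
      · rw [if_neg (by simpa using hs), if_neg (by simpa using hs)]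
        exact hfold PySem.Set.empty [] srRank_empty
      · rw [if_pos hs, if_pos hs]
        refine hfold _ [s] ?_
        rw [srRank_single]
        show srScore s = max 0 (srScore s)
        have := srScore_nonneg s
        omega
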